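-- pv_equiv track=rewrite | github.com/redspottedbittern/clembench | games/wizardsapprentice/utils/__init__.py | get_players_by_order
-- ===== SOURCE A (Python) =====
-- def get_players_by_order(table):
--     order_dict = {}
--     for key, nested_dict in table.items():
--         order = nested_dict.get('Order')
--         if order is not None:
--             if order not in order_dict:
--                 order_dict[order] = []
--             order_dict[order].append(key)
--
--     sorted_orders = sorted(order_dict.keys())
--     sorted_keys = []
--
--     for order in sorted_orders:
--         sorted_keys.extend(order_dict[order])
--
--     return sorted_keys
-- ===== SOURCE B (Python) =====
-- def get_players_by_order(table):
--     orders = sorted({v.get('Order') for v in table.values()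
--                      if v.get('Order') is not None})
--     return [k for o in orders
--               for k, v in table.items() if v.get('Order') == o]
-- ===== Notes on version B (the rewrite author's own statement) =====
-- stated objective: alternative
-- what changed: B removes A's bucket-dict grouping entirely: it computes the sorted set of distinct Order values and emits, for each order in turn, the keys carrying that order in table order (sorted-distinct-values plus per-value scan instead of one-pass dict bucketing and concatenation).
import Mathlib
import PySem

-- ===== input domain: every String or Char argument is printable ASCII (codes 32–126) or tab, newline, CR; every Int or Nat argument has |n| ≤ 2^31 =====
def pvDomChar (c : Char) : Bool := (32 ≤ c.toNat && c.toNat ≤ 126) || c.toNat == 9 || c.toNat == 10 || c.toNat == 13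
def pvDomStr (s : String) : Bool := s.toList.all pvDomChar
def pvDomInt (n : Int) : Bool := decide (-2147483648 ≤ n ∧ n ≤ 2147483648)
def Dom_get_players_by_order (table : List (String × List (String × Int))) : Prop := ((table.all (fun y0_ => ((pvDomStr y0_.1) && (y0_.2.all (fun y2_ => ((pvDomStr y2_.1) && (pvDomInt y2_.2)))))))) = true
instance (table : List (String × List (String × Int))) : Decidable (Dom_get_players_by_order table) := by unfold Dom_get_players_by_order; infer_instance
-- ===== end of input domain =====

-- B drops A's bucket dict: it lists the distinct Order values in sorted order and emits, per
-- order, the keys carrying it in table order (objective: alternative decomposition, not faster).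

-- ===== PORT A =====
-- nested_dict.get('Order')   (shared by both ports: both sources contain this very expression)
def pvGetOrder (nd : List (String × Int)) : Option Int := (PySem.Dict.mk nd).get? "Order"

def get_players_by_order (table : List (String × List (String × Int))) : List String :=
  -- for key, nested_dict in table.items(): …
  let order_dict : PySem.Dict Int (List String) :=
    table.foldl (fun d kv =>
      match pvGetOrder kv.2 with
      | none => d                                           -- order is None: skip
      | some o =>
          -- if order not in order_dict: order_dict[order] = []
          let d' := if d.contains o then d else d.insert o ([] : List String)
          -- order_dict[order].append(key)
          d'.modify o [] (fun l => l ++ [kv.1])) PySem.Dict.empty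
  let sorted_orders := PySem.List.sorted order_dict.keys (fun x => x) false
  -- for order in sorted_orders: sorted_keys.extend(order_dict[order])
  sorted_orders.foldl (fun acc o => acc ++ order_dict.getD o []) []

-- ===== PORT B =====
def get_players_by_order_alt (table : List (String × List (String × Int))) : List String :=
  -- orders = sorted({v.get('Order') for v in table.values() if v.get('Order') is not None})
  let orders := PySem.List.sorted
    (PySem.Set.ofList (table.filterMap (fun kv => pvGetOrder kv.2))) (fun x => x) false
  -- [k for o in orders for k, v in table.items() if v.get('Order') == o]
  orders.flatMap (fun o =>
    (table.filter (fun kv => pvGetOrder kv.2 == some o)).map (fun kv => kv.1))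

-- ===== PRECONDITION & SPEC =====
def Spec_get_players_by_order (table : List (String × List (String × Int))) (out : List String) : Prop := out = get_players_by_order_alt table
instance (table : List (String × List (String × Int))) (out : List String) : Decidable (Spec_get_players_by_order table out) := by unfold Spec_get_players_by_order; infer_instance

-- ===== CLAIM (what is proved, stated in full; the proofs are below) =====
def Claim_equal_get_players_by_order : Prop := ∀ (table : List (String × List (String × Int))), Dom_get_players_by_order table → Spec_get_players_by_order table (get_players_by_order table)

-- ===== LEMMAS AND PROOFS =====

-- the (Order, key) pairs A's loop really processes
def pvPairs (table : List (String × List (String × Int))) : List (Int × String) :=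
  table.filterMap (fun kv => (pvGetOrder kv.2).map (fun o => (o, kv.1)))

-- A's loop body is a plain `modify` (the "ensure-empty-bucket" branch is absorbed by the default)
theorem pvStep_eq_modify (d : PySem.Dict Int (List String)) (o : Int) (key : String) :
    (if d.contains o then d else d.insert o ([] : List String)).modify o [] (fun l => l ++ [key])
      = d.modify o [] (fun l => l ++ [key]) := by
  by_cases h : d.contains o = true
  · simp [h]
  · simp [h, PySem.Dict.modify, PySem.Dict.insert_insert_self,
      PySem.Dict.getD_insert_self,
      PySem.Dict.getD_of_not_contains d (k := o) (d0 := ([] : List String)) (by simpa using h)]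

-- A's dict-building loop over table = the canonical modify-loop over pvPairs
theorem pvLoop_eq (table : List (String × List (String × Int)))
    (d : PySem.Dict Int (List String)) :
    table.foldl (fun d kv =>
      match pvGetOrder kv.2 with
      | none => d
      | some o =>
          let d' := if d.contains o then d else d.insert o ([] : List String)
          d'.modify o [] (fun l => l ++ [kv.1])) d
    = (pvPairs table).foldl (fun d p => d.modify p.1 [] (fun l => l ++ [p.2])) d := by
  induction table generalizing d with
  | nil => rfl
  | cons kv t ih =>
      cases h : pvGetOrder kv.2 with
      | none => simp [pvPairs, List.foldl_cons, h, ih, pvPairs]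
      | some o =>
          simp only [pvPairs, List.filterMap_cons, h, Option.map_some, List.foldl_cons]
          rw [pvStep_eq_modify]
          exact ih _

-- the bucket of o = the keys of table whose Order is o, in table order
theorem pvFilter_pairs (table : List (String × List (String × Int))) (o : Int) :
    ((pvPairs table).filter (fun p => p.1 == o)).map (fun p => p.2)
      = (table.filter (fun kv => pvGetOrder kv.2 == some o)).map (fun kv => kv.1) := by
  induction table with
  | nil => rfl
  | cons kv t ih =>
      cases h : pvGetOrder kv.2 with
      | none => simp [pvPairs, h] at ih ⊢; exact ih
      | some o' =>
          by_cases ho : o' = o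
          · subst ho
            simp [pvPairs, h] at ih ⊢; exact ih
          · simp [pvPairs, h, ho] at ih ⊢; exact ih

-- the first components of pvPairs are exactly the non-None orders
theorem pvPairs_map_fst (table : List (String × List (String × Int))) :
    (pvPairs table).map (fun p => p.1) = table.filterMap (fun kv => pvGetOrder kv.2) := by
  simp [pvPairs, List.map_filterMap, Option.map_map, Function.comp_def]

-- ===== VERDICT (by name: the statement is the Claim_ definition above) =====
theorem get_players_by_order_spec : Claim_equal_get_players_by_order := by
  intro table _
  unfold Spec_get_players_by_order get_players_by_order get_players_by_order_alt
  simp only []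
  rw [pvLoop_eq]
  rw [PySem.Dict.keys_foldl_modify_key (pvPairs table) (fun p => p.1) []
      (fun _ p => fun l => l ++ [p.2]) PySem.Dict.empty]
  rw [PySem.List.foldl_append_eq_flatMap]
  have hkeys : PySem.Set.update ((PySem.Dict.empty : PySem.Dict Int (List String)).keys) ((pvPairs table).map (fun p => p.1))
      = PySem.Set.ofList (table.filterMap (fun kv => pvGetOrder kv.2)) := by
    rw [pvPairs_map_fst]; rfl
  rw [hkeys]
  simp only [List.nil_append]
  refine List.flatMap_congr ?_
  intro o _
  rw [PySem.Dict.getD_foldl_modify_append, PySem.Dict.getD_empty, List.nil_append,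
    pvFilter_pairs]
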